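-- pv_equiv track=rewrite | github.com/Sergey-Tkachenko/yandex_algo_practice | div_B/homework_6/task_A/task_A.py | right_bs
-- ===== SOURCE A (Python) =====
-- def right_bs(seq, rb):
--     l = 0
--     r = len(seq) - 1
--     while l < r:
--         m = l + (r - l + 1) // 2
--         if seq[m] <= rb:
--             l = m
--         else:
--             r = m - 1
--
--     return l
-- ===== SOURCE B (Python) =====
-- def right_bs(seq, rb):
--     # Recursive divide-and-conquer on shrinking sub-lists: the window itself is
--     # sliced in half each call, carrying only the sub-list and its base offset;
--     # no l/r endpoints and no midpoint arithmetic remain.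
--     def go(sub, base):
--         if len(sub) <= 1:
--             return base
--         h = len(sub) // 2
--         if sub[h] <= rb:
--             return go(sub[h:], base + h)
--         return go(sub[:h], base)
--     return go(seq, 0)
-- ===== Notes on version B (the rewrite author's own statement) =====
-- stated objective: alternative
-- what changed: The iterative binary search over endpoint pair (l, r) with midpoint m = l + (r-l+1)//2 is replaced by a recursive divide-and-conquer that slices the list itself in half each call, carrying only the current sub-list and its base offset; no endpoints, no midpoint variable and no m-1 update exist, and each call recurses on sub[h:] or sub[:h].
import Mathlib
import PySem

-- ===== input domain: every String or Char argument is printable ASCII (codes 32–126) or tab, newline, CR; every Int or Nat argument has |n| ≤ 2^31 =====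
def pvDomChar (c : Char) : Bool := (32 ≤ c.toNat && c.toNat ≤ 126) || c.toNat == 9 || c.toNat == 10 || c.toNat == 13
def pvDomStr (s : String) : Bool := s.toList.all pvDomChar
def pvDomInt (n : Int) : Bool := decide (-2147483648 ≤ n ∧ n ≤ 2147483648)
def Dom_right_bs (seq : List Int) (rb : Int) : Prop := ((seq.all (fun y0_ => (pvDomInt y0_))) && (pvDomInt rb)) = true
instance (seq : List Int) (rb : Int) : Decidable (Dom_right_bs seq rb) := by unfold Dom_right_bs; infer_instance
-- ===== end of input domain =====

-- B replaces A's endpoint-pair while-loop by a recursive divide-and-conquer that slices the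
-- list itself in half each call; objective: alternative decomposition, same result.

-- ===== PORT A =====
-- A's while-loop as recursion on the state (l, r), with fuel seq.length (proved sufficient
-- below: the loop runs at most r - l times).  seq[m] is ported with pyGet?; every state
-- reachable from (0, len-1) has m in range, so Python never raises here and the .getD 0
-- default is never the returned value.
def rbLoopA (seq : List Int) (rb : Int) : Nat → Int → Int → Int
  | 0, l, _ => l
  | fuel + 1, l, r =>
    if l < r then
      let m := l + PySem.Int.floordiv (r - l + 1) 2
      if (PySem.List.pyGet? seq m).getD 0 ≤ rb then
        rbLoopA seq rb fuel m r
      else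
        rbLoopA seq rb fuel l (m - 1)
    else l

def right_bs (seq : List Int) (rb : Int) : Int :=
  rbLoopA seq rb seq.length 0 ((seq.length : Int) - 1)

-- ===== PORT B =====
-- B's inner go(sub, base): structural divide-and-conquer on the sub-list.  len(sub)//2 on a
-- nonnegative Python int is exactly Nat division; the slices sub[h:] / sub[:h] with
-- 0 ≤ h ≤ len(sub) are exactly List.drop h / List.take h; sub[h] is ported with pyGet? (h is
-- in range whenever the branch is reached, so Python never raises and .getD 0 is never hit).
def rbGo (rb : Int) (sub : List Int) (base : Int) : Int :=
  if sub.length ≤ 1 then base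
  else
    let h := sub.length / 2
    if (PySem.List.pyGet? sub (h : Int)).getD 0 ≤ rb then
      rbGo rb (sub.drop h) (base + h)
    else
      rbGo rb (sub.take h) base
termination_by sub.length
decreasing_by
  · have : 1 ≤ sub.length / 2 := by omega
    simpa [List.length_drop] using by omega
  · simpa [List.length_take] using by omega

def right_bs_alt (seq : List Int) (rb : Int) : Int :=
  rbGo rb seq 0

-- ===== PRECONDITION & SPEC =====
def Spec_right_bs (seq : List Int) (rb : Int) (out : Int) : Prop := out = right_bs_alt seq rb
instance (seq : List Int) (rb : Int) (out : Int) : Decidable (Spec_right_bs seq rb out) := by unfold Spec_right_bs; infer_instance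

-- ===== CLAIM =====
def Claim_equal_right_bs : Prop := ∀ (seq : List Int) (rb : Int), Dom_right_bs seq rb → Spec_right_bs seq rb (right_bs seq rb)

-- ===== LEMMAS AND PROOFS =====

theorem rbGo_base (rb : Int) (sub : List Int) (base : Int) (h : sub.length ≤ 1) :
    rbGo rb sub base = base := by
  rw [rbGo]; simp [h]

-- The loop on (l, r) equals go on the window seq[l..r] with base l.
theorem rbLoopA_eq_rbGo (seq : List Int) (rb : Int) :
    ∀ (fuel : Nat) (l r : Int), 0 ≤ l → l ≤ r + 1 → r < (seq.length : Int) →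
      (r - l).toNat ≤ fuel →
      rbLoopA seq rb fuel l r = rbGo rb ((seq.drop l.toNat).take (r + 1 - l).toNat) l := by
  intro fuel
  induction fuel with
  | zero =>
    intro l r hl hlr hr hf
    have hwin : ((seq.drop l.toNat).take (r + 1 - l).toNat).length ≤ 1 := by
      simp only [List.length_take, List.length_drop]
      omega
    rw [rbGo_base rb _ l hwin]
    rfl
  | succ n ih =>
    intro l r hl hlr hr hf
    rw [rbLoopA]
    by_cases hcase : l < r
    · -- window has length r + 1 - l ≥ 2
      have hlen : ((seq.drop l.toNat).take (r + 1 - l).toNat).length = (r + 1 - l).toNat := by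
        simp only [List.length_take, List.length_drop]
        omega
      have hdv : PySem.Int.floordiv (r - l + 1) 2 = (r - l + 1) / 2 :=
        PySem.Int.floordiv_eq_ediv_of_pos (by omega)
      simp only [if_pos hcase, hdv]
      set m : Int := l + (r - l + 1) / 2 with hm
      have hmb : l < m ∧ m ≤ r := by constructor <;> omega
      have hfa : (r - m).toNat ≤ n := by omega
      have hfb : (m - 1 - l).toNat ≤ n := by omega
      have hm0 : (0:Int) ≤ m := by omega
      have hmr1 : m ≤ r + 1 := by omega
      have hm1l : l ≤ (m - 1) + 1 := by omega
      have hm1r : m - 1 < (seq.length : Int) := by omega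
      -- B side: unfold rbGo once
      rw [rbGo]
      have h2 : ¬ ((seq.drop l.toNat).take (r + 1 - l).toNat).length ≤ 1 := by omega
      simp only [if_neg h2]
      set hh : Nat := ((seq.drop l.toNat).take (r + 1 - l).toNat).length / 2 with hhh
      have hcast : (hh : Int) = (r - l + 1) / 2 := by
        rw [hhh, hlen]
        rw [Int.natCast_div]
        push_cast
        omega
      have hmh : m.toNat = l.toNat + hh := by omega
      -- the probed cells are equal
      have hhlt : hh < (r + 1 - l).toNat := by omega
      have hprobe : (PySem.List.pyGet? ((seq.drop l.toNat).take (r + 1 - l).toNat) (hh : Int)).getD 0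
          = (PySem.List.pyGet? seq m).getD 0 := by
        rw [PySem.List.pyGet?_natCast, PySem.List.pyGet?_of_nonneg seq hm0]
        rw [List.getElem?_take_of_lt hhlt, List.getElem?_drop, hmh]
      rw [hprobe]
      by_cases hc : (PySem.List.pyGet? seq m).getD 0 ≤ rb
      · simp only [if_pos hc]
        rw [ih m r hm0 hmr1 hr hfa]
        congr 1
        · rw [List.drop_take, List.drop_drop, hmh]
          congr 1
          omega
        · omega
      · simp only [if_neg hc]
        rw [ih l (m - 1) hl hm1l hm1r hfb]
        have hnat : min hh ((r + 1 - l).toNat) = (m - 1 + 1 - l).toNat := by omega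
        rw [List.take_take, hnat]
    · have hwin : ((seq.drop l.toNat).take (r + 1 - l).toNat).length ≤ 1 := by
        simp only [List.length_take, List.length_drop]
        omega
      rw [rbGo_base rb _ l hwin]
      simp [hcase]

-- ===== VERDICT =====
theorem right_bs_spec : Claim_equal_right_bs := by
  intro seq rb _
  unfold Spec_right_bs right_bs right_bs_alt
  rw [rbLoopA_eq_rbGo seq rb seq.length 0 ((seq.length : Int) - 1) le_rfl (by omega)
      (by omega) (by omega)]
  simp
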